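-- pv_equiv track=rewrite | github.com/alzorix/homework | VARIANT/24.py | get_chet
-- ===== SOURCE A (Python) =====
-- allowline= "24680AC"
--
-- def get_chet(num):
--     num = str(num)
--     m = [p for p in num]
--     m.reverse()
--     for n,p  in enumerate(m):
--         if p in allowline:
--             m = m[n::]
--             m.reverse()
--             return "".join(m)
--     return ""
-- ===== SOURCE B (Python) =====
-- allowline = "24680AC"
--
-- def get_chet(num):
--     s = str(num)
--     last = -1
--     for i, c in enumerate(s):
--         if c in allowline:
--             last = i
--     return s[:last + 1]
-- ===== Notes on version B (the rewrite author's own statement) =====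
-- stated objective: simpler
-- what changed: Single forward pass that remembers the index of the last allowed character and returns one prefix slice, instead of A's list-copy, reverse, reverse-scan with early return, suffix slice and second reverse.
import Mathlib
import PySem

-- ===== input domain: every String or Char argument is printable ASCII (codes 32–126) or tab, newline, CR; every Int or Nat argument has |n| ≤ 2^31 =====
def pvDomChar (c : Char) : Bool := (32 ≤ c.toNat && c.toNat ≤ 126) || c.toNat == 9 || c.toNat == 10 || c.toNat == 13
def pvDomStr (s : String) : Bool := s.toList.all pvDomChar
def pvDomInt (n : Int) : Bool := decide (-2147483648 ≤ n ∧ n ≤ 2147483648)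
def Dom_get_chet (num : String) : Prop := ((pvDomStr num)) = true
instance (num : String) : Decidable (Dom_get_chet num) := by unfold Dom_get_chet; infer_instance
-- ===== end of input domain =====

-- B replaces A's copy/reverse/scan/slice/re-reverse with one forward pass remembering the last allowed index; objective: simpler.

-- allowline = "24680AC"
def pvAllow : List Char := "24680AC".toList

-- ===== PORT A =====
-- the for-loop over enumerate(m) with early return; m stays the full reversed list
def getChetGo (m : List Char) (rest : List (Int × Char)) : String :=
  match rest with
  | [] => ""                                   -- return "" after the loop
  | (n, p) :: t =>
    if pvAllow.contains p then
      -- m = m[n::]; m.reverse(); return "".join(m)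
      String.ofList ((PySem.List.slice m (some n) none).reverse)
    else getChetGo m t

def get_chet (num : String) : String :=
  let m := num.toList.reverse                  -- m = [p for p in num]; m.reverse()
  getChetGo m (PySem.List.enumerate m)

-- ===== PORT B =====
def get_chet_alt (num : String) : String :=
  let s := num.toList
  let last : Int :=
    (PySem.List.enumerate s).foldl
      (fun acc ic => if pvAllow.contains ic.2 then ic.1 else acc) (-1)
  String.ofList (PySem.List.slice s none (some (last + 1)))   -- s[:last+1]

-- ===== PRECONDITION & SPEC =====
def Spec_get_chet (num : String) (out : String) : Prop := out = get_chet_alt num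
instance (num : String) (out : String) : Decidable (Spec_get_chet num out) := by unfold Spec_get_chet; infer_instance

-- ===== CLAIM (what is proved, stated in full; the proofs are below) =====
def Claim_equal_get_chet : Prop := ∀ (num : String), Dom_get_chet num → Spec_get_chet num (get_chet num)

-- ===== LEMMAS AND PROOFS =====

-- A's loop body, characterised by the first allowed index of the remaining list
lemma getChetGo_eq (m : List Char) (t : List Char) (k : ℕ) :
    getChetGo m (PySem.List.enumerate t (k : Int)) =
      match t.findIdx? (pvAllow.contains ·) with
      | some j => String.ofList ((PySem.List.slice m (some ((k + j : ℕ) : Int)) none).reverse)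
      | none => "" := by
  induction t generalizing k with
  | nil => simp [PySem.List.enumerate, getChetGo]
  | cons x xs ih =>
    rw [PySem.List.enumerate_cons, getChetGo, List.findIdx?_cons]
    by_cases hx : pvAllow.contains x = true
    · simp only [hx, if_true]
      norm_num
    · rw [if_neg hx, if_neg hx]
      have hk : ((k : Int) + 1) = ((k + 1 : ℕ) : Int) := by push_cast; ring
      rw [hk, ih (k + 1)]
      cases h : xs.findIdx? (pvAllow.contains ·) with
      | none => simp only [Option.map_none]
      | some j =>
        simp only [Option.map_some]
        have : k + 1 + j = k + (j + 1) := by omega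
        rw [this]

-- B's fold, characterised by the first allowed index of the reversed list
lemma foldLast_eq (t : List Char) (k : ℕ) (a : Int) :
    (PySem.List.enumerate t (k : Int)).foldl
        (fun acc ic => if pvAllow.contains ic.2 then ic.1 else acc) a =
      match t.reverse.findIdx? (pvAllow.contains ·) with
      | some j => ((k + (t.length - 1 - j) : ℕ) : Int)
      | none => a := by
  induction t using List.reverseRecOn generalizing a with
  | nil => simp [PySem.List.enumerate]
  | append_singleton xs x ih =>
    rw [PySem.List.enumerate_append, List.foldl_append]
    simp only [PySem.List.enumerate_cons, PySem.List.enumerate_nil, List.foldl_cons,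
      List.foldl_nil, List.reverse_append, List.reverse_cons, List.reverse_nil,
      List.nil_append, List.cons_append, List.findIdx?_cons]
    by_cases hx : pvAllow.contains x = true
    · rw [if_pos hx, if_pos hx]
      simp [List.length_append]
    · rw [if_neg hx, if_neg hx, ih]
      cases h : xs.reverse.findIdx? (pvAllow.contains ·) with
      | none => simp only [Option.map_none]
      | some j =>
        have hj : j < xs.length := by
          have := List.findIdx?_eq_some_iff_findIdx_eq.mp h
          simpa using this.1
        simp only [Option.map_some]
        have : k + (xs.length - 1 - j) = k + ((xs ++ [x]).length - 1 - (j + 1)) := by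
          simp only [List.length_append, List.length_cons, List.length_nil]
          omega
        rw [this]

lemma findIdx?_lt (p : Char → Bool) (l : List Char) (j : ℕ)
    (h : l.findIdx? p = some j) : j < l.length := by
  have := List.findIdx?_eq_some_iff_findIdx_eq.mp h
  exact this.1

-- ===== VERDICT (by name: the statement is the Claim_ definition above) =====
theorem get_chet_spec : Claim_equal_get_chet := by
  intro num _
  unfold Spec_get_chet
  show getChetGo num.toList.reverse (PySem.List.enumerate num.toList.reverse ((0 : ℕ) : Int)) =
    String.ofList (PySem.List.slice num.toList none
      (some ((PySem.List.enumerate num.toList ((0 : ℕ) : Int)).foldl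
        (fun acc ic => if pvAllow.contains ic.2 then ic.1 else acc) (-1) + 1)))
  set l := num.toList with hl
  rw [getChetGo_eq, foldLast_eq]
  cases h : l.reverse.findIdx? (pvAllow.contains ·) with
  | none =>
    rw [show ((-1 : Int) + 1) = ((0 : ℕ) : Int) by norm_num, PySem.List.slice_to_natCast]
    simp
  | some j =>
    have hj : j < l.length := by
      have := findIdx?_lt _ _ _ h
      simpa using this
    simp only [Nat.zero_add]
    have h2 : ((l.length - 1 - j : ℕ) : Int) + 1 = ((l.length - j : ℕ) : Int) := by
      push_cast [Nat.sub_sub]; omega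
    rw [h2, PySem.List.slice_to_natCast, PySem.List.slice_from_natCast, List.reverse_drop]
    simp
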